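-- pv_equiv track=rewrite | github.com/andrewkho/aoc2020 | day17/run.py | _part_one
-- ===== SOURCE A (Python) =====
-- import itertools
--
-- def _active_neighbours(active, coord):
--     c = 0
--     iterator = itertools.product(
--         *[range(-1, 2) for _ in coord]
--     )
--     for delta in iterator:
--         if all(d == 0 for d in delta):
--             continue
--
--         if tuple(c + d for c, d in zip(coord, delta)) in active:
--             c += 1
--
--     return c
--
-- def _part_one(data):
--     n_cycles = 6
--
--     a = data[0]
--     active = data[1]
--
--
--     for i in range(n_cycles):
--         b = dict()
--         bctive = set()
--
--         # Handle active case
--         for coord in active: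
--             if _active_neighbours(active, coord) in (2, 3):
--                 b[coord] = '#'
--                 bctive.add(coord)
--
--         processed = set()
--         # Handle inactive cases flipping
--         for coord in active:
--             iterator = itertools.product(
--                 *[range(-1, 2) for _ in coord]
--             )
--             for delta in iterator:
--                 new_coord = tuple(c+d for c, d in zip(coord, delta))
--                 # Only consider inactive
--                 if new_coord in active:
--                     continue
--                 # Skip if already processed
--                 if new_coord in processed:
--                     continue
--
--                 if _active_neighbours(active, new_coord) == 3:
--                     b[new_coord] = '#'
--                     bctive.add(new_coord)
--
--                 processed.add(new_coord)
--         a = b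
--         active = bctive
--
--     return len(active)
-- ===== SOURCE B (Python) =====
-- import itertools
--
-- def _part_one(data):
--     n_cycles = 6
--     active = data[1]
--     for _ in range(n_cycles):
--         # one pass: tally each cell's contribution to all of its neighbours
--         cnt = {}
--         for coord in active:
--             for delta in itertools.product(*[range(-1, 2) for _ in coord]):
--                 if all(d == 0 for d in delta):
--                     continue
--                 n = tuple(c + d for c, d in zip(coord, delta))
--                 cnt[n] = cnt.get(n, 0) + 1
--         # birth/survival rule applied once per touched cell
--         active = {c for c, v in cnt.items() if v == 3 or (v == 2 and c in active)}
--     return len(active)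
-- ===== Notes on version B (the rewrite author's own statement) =====
-- stated objective: faster
-- what changed: Instead of re-scanning the 3^d neighbourhood of every active cell and of every neighbour of an active cell (with a 'processed' set), B makes one pass over the active cells tallying each cell's contribution to its neighbours in a dict, then applies the birth/survival rule (3, or 2 and already active) once per touched cell.
import Mathlib
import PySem

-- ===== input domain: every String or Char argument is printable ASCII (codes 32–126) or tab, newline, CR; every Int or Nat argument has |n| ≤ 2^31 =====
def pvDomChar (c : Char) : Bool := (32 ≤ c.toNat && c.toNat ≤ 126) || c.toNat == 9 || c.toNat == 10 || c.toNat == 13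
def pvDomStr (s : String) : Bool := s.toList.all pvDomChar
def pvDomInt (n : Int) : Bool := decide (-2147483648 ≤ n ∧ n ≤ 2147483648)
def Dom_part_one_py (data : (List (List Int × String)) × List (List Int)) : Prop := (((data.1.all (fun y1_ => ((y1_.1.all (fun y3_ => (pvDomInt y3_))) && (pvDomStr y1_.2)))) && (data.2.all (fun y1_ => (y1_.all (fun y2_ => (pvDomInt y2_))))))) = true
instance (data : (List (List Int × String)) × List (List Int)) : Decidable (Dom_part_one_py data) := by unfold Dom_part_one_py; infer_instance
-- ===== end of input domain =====

-- B replaces A's per-cell neighbourhood re-scans (plus a 'processed' set) by ONE pass tallying each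
-- active cell's contribution to its neighbours in a dict, then applies the birth/survival rule once
-- per touched cell (objective: faster, fewer neighbourhood scans per cycle).

-- shared helper: itertools.product(*[range(-1, 2) for _ in coord]) — the 3^d delta tuples,
-- first component varying slowest (CPython's product order); both Pythons use this expression.
def pyDeltas : Nat → List (List Int)
  | 0 => [[]]
  | k + 1 => ([-1, 0, 1] : List Int).flatMap (fun d => (pyDeltas k).map (fun t => d :: t))

-- ===== PORT A =====
-- helper _active_neighbours(active, coord)
def activeNeighbours (active : List (List Int)) (coord : List Int) : Int :=
  (pyDeltas coord.length).foldl (fun c delta =>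
    if delta.all (fun d => d == 0) then c
    else if List.zipWith (· + ·) coord delta ∈ active then c + 1
    else c) 0

def part_one_py (data : (List (List Int × String)) × List (List Int)) : Int :=
  let a := PySem.Dict.mk data.1
  let active := data.2
  let fin := (PySem.List.pyRange 0 6 1).foldl
    (fun (st : PySem.Dict (List Int) String × List (List Int)) _ =>
      let active := st.2
      -- Handle active case
      let bb := active.foldl
        (fun (st : PySem.Dict (List Int) String × List (List Int)) coord =>
          if activeNeighbours active coord = 2 ∨ activeNeighbours active coord = 3 then
            (st.1.insert coord "#", PySem.Set.add st.2 coord)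
          else st)
        (PySem.Dict.empty, PySem.Set.empty)
      -- Handle inactive cases flipping (with the 'processed' set as third component)
      let res := active.foldl
        (fun (st : (PySem.Dict (List Int) String × List (List Int)) × List (List Int)) coord =>
          (pyDeltas coord.length).foldl (fun st delta =>
            let newCoord := List.zipWith (· + ·) coord delta
            if newCoord ∈ active then st
            else if newCoord ∈ st.2 then st
            else
              let st' := if activeNeighbours active newCoord = 3 then
                  ((st.1.1.insert newCoord "#", PySem.Set.add st.1.2 newCoord), st.2)
                else st
              (st'.1, PySem.Set.add st'.2 newCoord)) st)
        (bb, PySem.Set.empty)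
      res.1)
    (a, active)
  PySem.List.len fin.2

-- ===== PORT B =====
def part_one_py_alt (data : (List (List Int × String)) × List (List Int)) : Int :=
  let active := data.2
  let fin := (PySem.List.pyRange 0 6 1).foldl
    (fun (active : List (List Int)) _ =>
      let cnt := active.foldl
        (fun (cnt : PySem.Dict (List Int) Int) coord =>
          (pyDeltas coord.length).foldl (fun cnt delta =>
            if delta.all (fun d => d == 0) then cnt
            else
              let n := List.zipWith (· + ·) coord delta
              cnt.insert n (cnt.getD n 0 + 1)) cnt)
        PySem.Dict.empty
      cnt.items.foldl
        (fun t p => if p.2 = 3 ∨ (p.2 = 2 ∧ p.1 ∈ active) then PySem.Set.add t p.1 else t)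
        PySem.Set.empty)
    active
  PySem.List.len fin

-- ===== PRECONDITION & SPEC =====
-- Pre_ is the representation invariant of the set-typed argument data[1] (a Python set always has
-- distinct elements, so every input the Python function receives satisfies it); it excludes only
-- Lean-side lists that do not represent a set.
def Pre_part_one_py (data : (List (List Int × String)) × List (List Int)) : Prop := data.2.Nodup
instance (data : (List (List Int × String)) × List (List Int)) : Decidable (Pre_part_one_py data) := by unfold Pre_part_one_py; infer_instance

def pvWitness_part_one_py : ((List (List Int × String)) × List (List Int)) :=
  ([([0, 0], "#")], [[0, 0], [0, 1], [0, 2]])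

def Spec_part_one_py (data : (List (List Int × String)) × List (List Int)) (out : Int) : Prop := out = part_one_py_alt data
instance (data : (List (List Int × String)) × List (List Int)) (out : Int) : Decidable (Spec_part_one_py data out) := by unfold Spec_part_one_py; infer_instance

-- ===== CLAIM (what is proved, stated in full; the proofs are below) =====
def Claim_equal_part_one_py : Prop := ∀ (data : (List (List Int × String)) × List (List Int)), Dom_part_one_py data → Pre_part_one_py data → Spec_part_one_py data (part_one_py data)

-- ===== LEMMAS AND PROOFS =====

def near : List Int → List Int → Bool
  | [], [] => true
  | a :: c, b :: x => (decide (a - b ≤ 1) && decide (b - a ≤ 1)) && near c x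
  | _ :: _, [] => false
  | [], _ :: _ => false

def adjB (c x : List Int) : Bool := near c x && !(c == x)

def nbrN (s : List (List Int)) (x : List Int) : Nat := s.countP (fun c => adjB c x)

lemma countP_or_disj {α : Type} (l : List α) (p q : α → Bool)
    (h : ∀ a, ¬(p a = true ∧ q a = true)) :
    l.countP (fun a => p a || q a) = l.countP p + l.countP q := by
  induction l with
  | nil => rfl
  | cons x t ih =>
    simp only [List.countP_cons]
    have := h x
    cases hp : p x <;> cases hq : q x <;> simp_all <;> omega

lemma near_symm (c x : List Int) : near c x = near x c := by
  induction c generalizing x with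
  | nil => cases x <;> rfl
  | cons a c ih =>
    cases x with
    | nil => rfl
    | cons b x =>
      simp only [near, ih]
      by_cases h1 : a - b ≤ 1 <;> by_cases h2 : b - a ≤ 1 <;> simp [h1, h2]

lemma adjB_symm (c x : List Int) : adjB c x = adjB x c := by
  unfold adjB
  rw [near_symm]
  by_cases h : c = x
  · subst h; rfl
  · rw [show (c == x) = false from beq_eq_false_iff_ne.mpr h,
        show (x == c) = false from beq_eq_false_iff_ne.mpr (Ne.symm h)]

lemma zip_countP (c x : List Int) :
    (pyDeltas c.length).countP (fun d => List.zipWith (· + ·) c d == x) =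
      if near c x then 1 else 0 := by
  induction c generalizing x with
  | nil =>
    cases x <;> simp [pyDeltas, near, List.countP_nil]
  | cons a c ih =>
    cases x with
    | nil =>
      rw [List.countP_eq_zero.mpr, if_neg (by simp [near])]
      intro d hd
      simp only [List.length_cons, pyDeltas, List.mem_flatMap, List.mem_map] at hd
      obtain ⟨e, -, t, -, rfl⟩ := hd
      simp
    | cons b x =>
      simp only [List.length_cons, pyDeltas, List.flatMap_cons, List.flatMap_nil,
        List.countP_append, List.countP_map, List.append_nil, Function.comp_def,
        List.zipWith_cons_cons, List.cons_beq_cons]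
      have term : ∀ e : Int,
          (pyDeltas c.length).countP
              (fun t => (a + e == b) && (List.zipWith (· + ·) c t == x)) =
            if a + e = b then (if near c x then 1 else 0) else 0 := by
        intro e
        by_cases h : a + e = b
        · rw [if_pos h, ← ih]
          apply List.countP_congr
          intro t _
          rw [show (a + e == b) = true from beq_iff_eq.mpr h, Bool.true_and]
        · rw [if_neg h, List.countP_eq_zero.mpr]
          intro t _
          rw [show (a + e == b) = false from beq_eq_false_iff_ne.mpr h, Bool.false_and]
          simp
      rw [term, term, term]
      simp only [near]
      by_cases hm : b = a - 1
      · rw [if_pos (show a + -1 = b by omega), if_neg (show ¬ a + 0 = b by omega),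
            if_neg (show ¬ a + 1 = b by omega)]
        simp [show a - b ≤ 1 by omega, show b - a ≤ 1 by omega]
      by_cases h0 : b = a
      · rw [if_neg (show ¬ a + -1 = b by omega), if_pos (show a + 0 = b by omega),
            if_neg (show ¬ a + 1 = b by omega)]
        simp [show a - b ≤ 1 by omega, show b - a ≤ 1 by omega]
      by_cases hp : b = a + 1
      · rw [if_neg (show ¬ a + -1 = b by omega), if_neg (show ¬ a + 0 = b by omega),
            if_pos (show a + 1 = b by omega)]
        simp [show a - b ≤ 1 by omega, show b - a ≤ 1 by omega]
      · rw [if_neg (show ¬ a + -1 = b by omega), if_neg (show ¬ a + 0 = b by omega),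
            if_neg (show ¬ a + 1 = b by omega), if_neg (by simp; omega)]

lemma pair_countP (c x : List Int) :
    (pyDeltas c.length).countP
        (fun d => !(d.all (fun y => y == 0)) && (List.zipWith (· + ·) c d == x)) =
      if adjB c x then 1 else 0 := by
  induction c generalizing x with
  | nil =>
    cases x <;> simp [pyDeltas, adjB, near, List.countP_nil]
  | cons a c ih =>
    cases x with
    | nil =>
      rw [List.countP_eq_zero.mpr, if_neg (by simp [adjB, near])]
      intro d hd
      simp only [List.length_cons, pyDeltas, List.mem_flatMap, List.mem_map] at hd
      obtain ⟨e, -, t, -, rfl⟩ := hd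
      simp
    | cons b x =>
      simp only [List.length_cons, pyDeltas, List.flatMap_cons, List.flatMap_nil,
        List.countP_append, List.countP_map, List.append_nil, Function.comp_def,
        List.zipWith_cons_cons, List.cons_beq_cons, List.all_cons]
      have termNZ : ∀ e : Int, e ≠ 0 →
          (pyDeltas c.length).countP
              (fun t => !((e == 0) && t.all (fun y => y == 0)) &&
                ((a + e == b) && (List.zipWith (· + ·) c t == x))) =
            if a + e = b then (if near c x then 1 else 0) else 0 := by
        intro e he
        by_cases h : a + e = b
        · rw [if_pos h, ← zip_countP c x]
          apply List.countP_congr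
          intro t _
          rw [show (e == 0) = false from beq_eq_false_iff_ne.mpr he,
              show (a + e == b) = true from beq_iff_eq.mpr h]
          simp
        · rw [if_neg h, List.countP_eq_zero.mpr]
          intro t _
          rw [show (a + e == b) = false from beq_eq_false_iff_ne.mpr h]
          simp
      have termZ :
          (pyDeltas c.length).countP
              (fun t => !(((0:Int) == 0) && t.all (fun y => y == 0)) &&
                ((a + 0 == b) && (List.zipWith (· + ·) c t == x))) =
            if a = b then (if adjB c x then 1 else 0) else 0 := by
        by_cases h : a = b
        · rw [if_pos h, ← ih]
          apply List.countP_congr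
          intro t _
          rw [show (a + 0 == b) = true from beq_iff_eq.mpr (by omega)]
          simp [Bool.and_comm]
        · rw [if_neg h, List.countP_eq_zero.mpr]
          intro t _
          rw [show (a + 0 == b) = false from beq_eq_false_iff_ne.mpr (by omega)]
          simp
      rw [termNZ (-1) (by norm_num), termZ, termNZ 1 (by norm_num)]
      simp only [adjB, near, List.cons_beq_cons]
      by_cases hm : b = a - 1
      · rw [if_pos (show a + -1 = b by omega), if_neg (show ¬ a = b by omega),
            if_neg (show ¬ a + 1 = b by omega)]
        simp [show (a == b) = false from beq_eq_false_iff_ne.mpr (by omega),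
          show a - b ≤ 1 by omega, show b - a ≤ 1 by omega]
      by_cases h0 : b = a
      · rw [if_neg (show ¬ a + -1 = b by omega), if_pos (show a = b from h0.symm),
            if_neg (show ¬ a + 1 = b by omega)]
        simp [show (a == b) = true from beq_iff_eq.mpr h0.symm,
          show a - b ≤ 1 by omega, show b - a ≤ 1 by omega]
      by_cases hp : b = a + 1
      · rw [if_neg (show ¬ a + -1 = b by omega), if_neg (show ¬ a = b by omega),
            if_pos (show a + 1 = b by omega)]
        simp [show (a == b) = false from beq_eq_false_iff_ne.mpr (by omega),
          show a - b ≤ 1 by omega, show b - a ≤ 1 by omega]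
      · rw [if_neg (show ¬ a + -1 = b by omega), if_neg (show ¬ a = b by omega),
            if_neg (show ¬ a + 1 = b by omega), if_neg (by simp; omega)]

lemma exists_delta {c x : List Int} (h : near c x = true) :
    ∃ d ∈ pyDeltas c.length, List.zipWith (· + ·) c d = x := by
  have hz := zip_countP c x
  rw [if_pos h] at hz
  have hpos : 0 < (pyDeltas c.length).countP (fun d => List.zipWith (· + ·) c d == x) := by
    omega
  obtain ⟨d, hd, hdx⟩ := List.countP_pos_iff.mp hpos
  exact ⟨d, hd, by simpa using hdx⟩

lemma countP_mem_deltas (x : List Int) (s : List (List Int)) (hs : s.Nodup) :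
    (pyDeltas x.length).countP
      (fun d => !(d.all (fun y => y == 0)) && decide (List.zipWith (· + ·) x d ∈ s)) =
      nbrN s x := by
  induction s with
  | nil => simp [nbrN]
  | cons c t ih =>
    obtain ⟨hc, ht⟩ := List.nodup_cons.mp hs
    have split : ∀ d : List Int,
        (!(d.all (fun y => y == 0)) && decide (List.zipWith (· + ·) x d ∈ c :: t)) =
        ((!(d.all (fun y => y == 0)) && (List.zipWith (· + ·) x d == c)) ||
         (!(d.all (fun y => y == 0)) && decide (List.zipWith (· + ·) x d ∈ t))) := by
      intro d
      by_cases h1 : List.zipWith (· + ·) x d = c <;>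
        by_cases h2 : List.zipWith (· + ·) x d ∈ t <;> simp [h1, h2] <;> tauto
    rw [List.countP_congr (fun d _ => by rw [split d]), countP_or_disj]
    · rw [pair_countP x c, ih ht]
      simp only [nbrN, List.countP_cons, adjB_symm c x]
      omega
    · intro d ⟨h1, h2⟩
      simp only [Bool.and_eq_true, beq_iff_eq, decide_eq_true_eq] at h1 h2
      exact hc (h1.2 ▸ h2.2)

lemma activeNeighbours_eq (s : List (List Int)) (hs : s.Nodup) (x : List Int) :
    activeNeighbours s x = (nbrN s x : Int) := by
  unfold activeNeighbours
  rw [PySem.List.foldl_congr_mem (pyDeltas x.length)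
      (fun c delta =>
        if delta.all (fun d => d == 0) then c
        else if List.zipWith (· + ·) x delta ∈ s then c + 1 else c)
      (fun c delta =>
        if (¬ (delta.all (fun d => d == 0)) = true ∧ List.zipWith (· + ·) x delta ∈ s)
        then c + 1 else c)
      0
      (by
        intro acc d _
        by_cases h1 : d.all (fun y => y == 0) <;>
          by_cases h2 : List.zipWith (· + ·) x d ∈ s <;> simp [h1, h2])]
  rw [PySem.List.foldl_ite_add_one]
  rw [List.countP_congr
      (q := fun d => !(d.all (fun y => y == 0)) && decide (List.zipWith (· + ·) x d ∈ s))
      (fun d _ => by simp), countP_mem_deltas x s hs]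
  omega

-- ===== A side: survivors then births =====
def survFold (s : List (List Int)) : PySem.Dict (List Int) String × List (List Int) :=
  s.foldl (fun st coord =>
    if activeNeighbours s coord = 2 ∨ activeNeighbours s coord = 3 then
      (st.1.insert coord "#", PySem.Set.add st.2 coord)
    else st) (PySem.Dict.empty, PySem.Set.empty)

lemma survFold_aux (s : List (List Int)) :
    ∀ (l : List (List Int)) (st : PySem.Dict (List Int) String × List (List Int)),
      st.2.Nodup →
      (l.foldl (fun st coord =>
          if activeNeighbours s coord = 2 ∨ activeNeighbours s coord = 3 then
            (st.1.insert coord "#", PySem.Set.add st.2 coord)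
          else st) st).2.Nodup ∧
      (∀ x, x ∈ (l.foldl (fun st coord =>
          if activeNeighbours s coord = 2 ∨ activeNeighbours s coord = 3 then
            (st.1.insert coord "#", PySem.Set.add st.2 coord)
          else st) st).2 ↔
        x ∈ st.2 ∨ (x ∈ l ∧ (activeNeighbours s x = 2 ∨ activeNeighbours s x = 3))) := by
  intro l
  induction l with
  | nil => intro st h; simpa using h
  | cons c l ih =>
    intro st hst
    simp only [List.foldl_cons]
    by_cases hc : activeNeighbours s c = 2 ∨ activeNeighbours s c = 3
    · rw [if_pos hc]
      obtain ⟨hn, hm⟩ := ih (st.1.insert c "#", PySem.Set.add st.2 c)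
        (PySem.Set.nodup_add _ _ hst)
      refine ⟨hn, fun x => ?_⟩
      rw [hm x]
      simp only [PySem.Set.mem_add, List.mem_cons]
      by_cases hxc : x = c
      · subst hxc; simp [hc]
      · simp [hxc]
    · rw [if_neg hc]
      obtain ⟨hn, hm⟩ := ih st hst
      refine ⟨hn, fun x => ?_⟩
      rw [hm x]
      simp only [List.mem_cons]
      by_cases hxc : x = c
      · subst hxc; simp [hc]
      · simp [hxc]

lemma mem_survFold (s x) : x ∈ (survFold s).2 ↔
    x ∈ s ∧ (activeNeighbours s x = 2 ∨ activeNeighbours s x = 3) := by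
  have := (survFold_aux s s (PySem.Dict.empty, PySem.Set.empty) List.nodup_nil).2 x
  rw [survFold, this]
  simp [PySem.Set.empty]

lemma nodup_survFold (s) : (survFold s).2.Nodup :=
  (survFold_aux s s (PySem.Dict.empty, PySem.Set.empty) List.nodup_nil).1

def birthsBody (s : List (List Int))
    (st : (PySem.Dict (List Int) String × List (List Int)) × List (List Int)) (n : List Int) :
    (PySem.Dict (List Int) String × List (List Int)) × List (List Int) :=
  if n ∈ s then st
  else if n ∈ st.2 then st
  else
    let st' := if activeNeighbours s n = 3 then
        ((st.1.1.insert n "#", PySem.Set.add st.1.2 n), st.2)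
      else st
    (st'.1, PySem.Set.add st'.2 n)

def PInv (s S0 : List (List Int))
    (st : (PySem.Dict (List Int) String × List (List Int)) × List (List Int)) : Prop :=
  (∀ y ∈ st.2, y ∉ s) ∧
  (∀ y, y ∈ st.1.2 ↔ (y ∈ S0 ∨ (y ∈ st.2 ∧ activeNeighbours s y = 3))) ∧
  st.1.2.Nodup ∧ st.2.Nodup

lemma birthsBody_step (s S0 st n) (h : PInv s S0 st) :
    PInv s S0 (birthsBody s st n) ∧ (∀ y ∈ st.2, y ∈ (birthsBody s st n).2) ∧
    (n ∉ s → n ∈ (birthsBody s st n).2) := by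
  obtain ⟨h1, h2, h3, h4⟩ := h
  unfold birthsBody
  by_cases hns : n ∈ s
  · rw [if_pos hns]
    exact ⟨⟨h1, h2, h3, h4⟩, fun y hy => hy, fun hn => absurd hns hn⟩
  rw [if_neg hns]
  by_cases hproc : n ∈ st.2
  · rw [if_pos hproc]
    exact ⟨⟨h1, h2, h3, h4⟩, fun y hy => hy, fun _ => hproc⟩
  rw [if_neg hproc]
  by_cases h3n : activeNeighbours s n = 3
  · rw [if_pos h3n]
    dsimp only
    refine ⟨⟨?_, ?_, PySem.Set.nodup_add _ _ h3, PySem.Set.nodup_add _ _ h4⟩, ?_, ?_⟩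
    · intro y hy
      rcases (PySem.Set.mem_add _ _ _).mp hy with hy | rfl
      · exact h1 y hy
      · exact hns
    · intro y
      simp only [PySem.Set.mem_add, h2 y]
      by_cases hyn : y = n
      · subst hyn; simp [h3n]
      · simp [hyn]
    · intro y hy; exact (PySem.Set.mem_add _ _ _).mpr (Or.inl hy)
    · intro _; exact (PySem.Set.mem_add _ _ _).mpr (Or.inr rfl)
  · rw [if_neg h3n]
    dsimp only
    refine ⟨⟨?_, ?_, h3, PySem.Set.nodup_add _ _ h4⟩, ?_, ?_⟩
    · intro y hy
      rcases (PySem.Set.mem_add _ _ _).mp hy with hy | rfl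
      · exact h1 y hy
      · exact hns
    · intro y
      rw [h2 y]
      simp only [PySem.Set.mem_add]
      by_cases hyn : y = n
      · subst hyn; simp [h3n, hproc]
      · simp [hyn]
    · intro y hy; exact (PySem.Set.mem_add _ _ _).mpr (Or.inl hy)
    · intro _; exact (PySem.Set.mem_add _ _ _).mpr (Or.inr rfl)

lemma births_fold (s S0 : List (List Int)) :
    ∀ (ns : List (List Int)) st, PInv s S0 st →
      PInv s S0 (ns.foldl (birthsBody s) st) ∧
      (∀ y ∈ st.2, y ∈ (ns.foldl (birthsBody s) st).2) ∧
      (∀ n ∈ ns, n ∉ s → n ∈ (ns.foldl (birthsBody s) st).2) := by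
  intro ns
  induction ns with
  | nil => intro st h; exact ⟨h, fun y hy => hy, by simp⟩
  | cons n ns ih =>
    intro st h
    obtain ⟨hP, hmono, hn⟩ := birthsBody_step s S0 st n h
    obtain ⟨hP', hmono', hcov'⟩ := ih (birthsBody s st n) hP
    refine ⟨hP', fun y hy => hmono' y (hmono y hy), ?_⟩
    intro m hm hms
    rcases List.mem_cons.mp hm with rfl | hm
    · exact hmono' m (hn hms)
    · exact hcov' m hm hms

lemma births_outer (s S0 : List (List Int)) :
    ∀ (cs : List (List Int)) st, PInv s S0 st →
      PInv s S0 (cs.foldl (fun st coord =>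
          (pyDeltas coord.length).foldl (fun st delta =>
            birthsBody s st (List.zipWith (· + ·) coord delta)) st) st) ∧
      (∀ y ∈ st.2, y ∈ (cs.foldl (fun st coord =>
          (pyDeltas coord.length).foldl (fun st delta =>
            birthsBody s st (List.zipWith (· + ·) coord delta)) st) st).2) ∧
      (∀ c ∈ cs, ∀ d ∈ pyDeltas c.length, List.zipWith (· + ·) c d ∉ s →
        List.zipWith (· + ·) c d ∈ (cs.foldl (fun st coord =>
          (pyDeltas coord.length).foldl (fun st delta =>
            birthsBody s st (List.zipWith (· + ·) coord delta)) st) st).2) := by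
  intro cs
  induction cs with
  | nil => intro st h; exact ⟨h, fun y hy => hy, by simp⟩
  | cons c cs ih =>
    intro st h
    simp only [List.foldl_cons]
    have hin : (pyDeltas c.length).foldl (fun st delta =>
        birthsBody s st (List.zipWith (· + ·) c delta)) st =
        ((pyDeltas c.length).map (List.zipWith (· + ·) c)).foldl (birthsBody s) st := by
      rw [List.foldl_map]
    rw [hin]
    obtain ⟨hP1, hmono1, hcov1⟩ :=
      births_fold s S0 ((pyDeltas c.length).map (List.zipWith (· + ·) c)) st h
    obtain ⟨hP2, hmono2, hcov2⟩ := ih _ hP1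
    refine ⟨hP2, fun y hy => hmono2 y (hmono1 y hy), ?_⟩
    intro c' hc' d hd hns
    rcases List.mem_cons.mp hc' with rfl | hc'
    · exact hmono2 _ (hcov1 _ (List.mem_map_of_mem hd) hns)
    · exact hcov2 c' hc' d hd hns

def stepA (s : List (List Int)) : PySem.Dict (List Int) String × List (List Int) :=
  (s.foldl (fun st coord =>
      (pyDeltas coord.length).foldl (fun st delta =>
        birthsBody s st (List.zipWith (· + ·) coord delta)) st)
    (survFold s, PySem.Set.empty)).1

lemma stepA_inv (s : List (List Int)) :
    PInv s (survFold s).2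
      (s.foldl (fun st coord =>
        (pyDeltas coord.length).foldl (fun st delta =>
          birthsBody s st (List.zipWith (· + ·) coord delta)) st)
      (survFold s, PySem.Set.empty)) ∧
    (∀ c ∈ s, ∀ d ∈ pyDeltas c.length, List.zipWith (· + ·) c d ∉ s →
      List.zipWith (· + ·) c d ∈ (s.foldl (fun st coord =>
        (pyDeltas coord.length).foldl (fun st delta =>
          birthsBody s st (List.zipWith (· + ·) coord delta)) st)
      (survFold s, PySem.Set.empty)).2) := by
  have h0 : PInv s (survFold s).2 (survFold s, PySem.Set.empty) := by
    refine ⟨by simp [PySem.Set.empty], fun y => by simp [PySem.Set.empty], nodup_survFold s,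
      by simp [PySem.Set.empty]⟩
  obtain ⟨hP, _, hcov⟩ := births_outer s (survFold s).2 s (survFold s, PySem.Set.empty) h0
  exact ⟨hP, hcov⟩

lemma nodup_stepA (s : List (List Int)) : (stepA s).2.Nodup :=
  (stepA_inv s).1.2.2.1

lemma mem_stepA (s : List (List Int)) (hs : s.Nodup) (x : List Int) :
    x ∈ (stepA s).2 ↔ (nbrN s x = 3 ∨ (nbrN s x = 2 ∧ x ∈ s)) := by
  obtain ⟨⟨hp1, hp2, hp3, hp4⟩, hcov⟩ := stepA_inv s
  have hmem : x ∈ (stepA s).2 ↔ _ := hp2 x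
  rw [stepA] at *
  rw [hmem]
  have hc := mem_survFold s x
  have haN : ∀ y, activeNeighbours s y = (nbrN s y : Int) := activeNeighbours_eq s hs
  constructor
  · rintro (hS0 | ⟨hproc, h3⟩)
    · rw [hc] at hS0
      obtain ⟨hxs, h23⟩ := hS0
      rw [haN] at h23
      rcases h23 with h | h
      · exact Or.inr ⟨by exact_mod_cast h, hxs⟩
      · exact Or.inl (by exact_mod_cast h)
    · rw [haN] at h3
      exact Or.inl (by exact_mod_cast h3)
  · rintro (h3 | ⟨h2, hxs⟩)
    · by_cases hxs : x ∈ s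
      · left; rw [hc]
        exact ⟨hxs, Or.inr (by rw [haN]; exact_mod_cast h3)⟩
      · right
        refine ⟨?_, by rw [haN]; exact_mod_cast h3⟩
        have hpos : 0 < nbrN s x := by omega
        obtain ⟨c, hcs, hadj⟩ := List.countP_pos_iff.mp (by simpa [nbrN] using hpos)
        have hnear : near c x = true := (by simpa [adjB, Bool.and_eq_true] using hadj : near c x = true ∧ _).1
        obtain ⟨d, hd, hzip⟩ := exists_delta hnear
        have hres := hcov c hcs d hd (by rw [hzip]; exact hxs)
        rw [hzip] at hres
        exact hres
    · left; rw [hc]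
      exact ⟨hxs, Or.inl (by rw [haN]; exact_mod_cast h2)⟩

-- ===== B side: neighbour-contribution counter =====
def contribs (s : List (List Int)) : List (List Int) :=
  s.flatMap (fun c =>
    ((pyDeltas c.length).filter (fun d => !(d.all (fun y => y == 0)))).map
      (fun d => List.zipWith (· + ·) c d))

def cntFold (s : List (List Int)) : PySem.Dict (List Int) Int :=
  s.foldl (fun cnt coord =>
    (pyDeltas coord.length).foldl (fun cnt delta =>
      if delta.all (fun d => d == 0) then cnt
      else
        cnt.insert (List.zipWith (· + ·) coord delta)
          (cnt.getD (List.zipWith (· + ·) coord delta) 0 + 1)) cnt) PySem.Dict.empty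

lemma cntFold_eq (s : List (List Int)) : cntFold s = PySem.Dict.counter (contribs s) := by
  unfold cntFold contribs
  have hinner : ∀ (cnt : PySem.Dict (List Int) Int) (c : List Int),
      (pyDeltas c.length).foldl (fun cnt delta =>
        if delta.all (fun d => d == 0) then cnt
        else
          cnt.insert (List.zipWith (· + ·) c delta)
            (cnt.getD (List.zipWith (· + ·) c delta) 0 + 1)) cnt =
      (((pyDeltas c.length).filter (fun d => !(d.all (fun y => y == 0)))).map
        (fun d => List.zipWith (· + ·) c d)).foldl
        (fun cnt n => cnt.insert n (cnt.getD n 0 + 1)) cnt := by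
    intro cnt c
    rw [List.foldl_map, ← PySem.List.foldl_if_eq_foldl_filter]
    apply PySem.List.foldl_congr_mem
    intro acc d _
    by_cases h : d.all (fun y => y == 0) <;> simp [h]
  rw [PySem.List.foldl_congr_mem _ _ _ _ (fun acc c _ => hinner acc c)]
  apply Eq.trans
    (b := ((s.map (fun c =>
        ((pyDeltas c.length).filter (fun d => !(d.all (fun y => y == 0)))).map
          (fun d => List.zipWith (· + ·) c d))).flatten).foldl
      (fun cnt n => cnt.insert n (cnt.getD n 0 + 1)) PySem.Dict.empty)
  · rw [List.foldl_flatten, List.foldl_map]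
  · rw [← List.flatMap_def, PySem.Dict.foldl_insert_getD_add_one_eq_counter]

lemma count_contribs (s : List (List Int)) (x : List Int) :
    (contribs s).count x = nbrN s x := by
  unfold contribs nbrN
  rw [List.count_flatMap]
  have hper : ∀ c : List Int,
      (((pyDeltas c.length).filter (fun d => !(d.all (fun y => y == 0)))).map
        (fun d => List.zipWith (· + ·) c d)).count x =
      if adjB c x then 1 else 0 := by
    intro c
    rw [List.count_eq_countP, List.countP_map, List.countP_filter, ← pair_countP c x]
    apply List.countP_congr
    intro d _
    simp [Function.comp, Bool.and_comm]
  rw [show (List.count x ∘ fun c =>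
        ((pyDeltas c.length).filter (fun d => !(d.all (fun y => y == 0)))).map
          (fun d => List.zipWith (· + ·) c d)) =
      (fun c => if adjB c x then 1 else 0) from funext fun c => hper c]
  exact PySem.List.sum_map_ite_one_zero_nat _ _

def stepB (s : List (List Int)) : List (List Int) :=
  (cntFold s).items.foldl
    (fun t p => if p.2 = 3 ∨ (p.2 = 2 ∧ p.1 ∈ s) then PySem.Set.add t p.1 else t)
    PySem.Set.empty

lemma selfold_aux (s : List (List Int)) :
    ∀ (l : List ((List Int) × Int)) (t0 : PySem.Set (List Int)), t0.Nodup →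
      (l.foldl (fun t p => if p.2 = 3 ∨ (p.2 = 2 ∧ p.1 ∈ s) then PySem.Set.add t p.1 else t)
        t0).Nodup ∧
      (∀ x, x ∈ l.foldl (fun t p => if p.2 = 3 ∨ (p.2 = 2 ∧ p.1 ∈ s) then PySem.Set.add t p.1 else t) t0 ↔
        x ∈ t0 ∨ ∃ p ∈ l, (p.2 = 3 ∨ (p.2 = 2 ∧ p.1 ∈ s)) ∧ p.1 = x) := by
  intro l
  induction l with
  | nil => intro t0 h; simpa using h
  | cons p l ih =>
    intro t0 h0
    simp only [List.foldl_cons]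
    by_cases hp : p.2 = 3 ∨ (p.2 = 2 ∧ p.1 ∈ s)
    · rw [if_pos hp]
      obtain ⟨hn, hm⟩ := ih (PySem.Set.add t0 p.1) (PySem.Set.nodup_add _ _ h0)
      refine ⟨hn, fun x => ?_⟩
      rw [hm x]
      simp only [PySem.Set.mem_add, List.mem_cons]
      constructor
      · rintro ((hx | rfl) | hx)
        · exact Or.inl hx
        · exact Or.inr ⟨p, Or.inl rfl, hp, rfl⟩
        · obtain ⟨q, hq, hc, rfl⟩ := hx
          exact Or.inr ⟨q, Or.inr hq, hc, rfl⟩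
      · rintro (hx | ⟨q, (rfl | hq), hc, rfl⟩)
        · exact Or.inl (Or.inl hx)
        · exact Or.inl (Or.inr rfl)
        · exact Or.inr ⟨q, hq, hc, rfl⟩
    · rw [if_neg hp]
      obtain ⟨hn, hm⟩ := ih t0 h0
      refine ⟨hn, fun x => ?_⟩
      rw [hm x]
      constructor
      · rintro (hx | ⟨q, hq, hc, rfl⟩)
        · exact Or.inl hx
        · exact Or.inr ⟨q, List.mem_cons_of_mem _ hq, hc, rfl⟩
      · rintro (hx | ⟨q, hq, hc, rfl⟩)
        · exact Or.inl hx
        · rcases List.mem_cons.mp hq with rfl | hq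
          · exact absurd hc hp
          · exact Or.inr ⟨q, hq, hc, rfl⟩

lemma nodup_stepB (s : List (List Int)) : (stepB s).Nodup :=
  (selfold_aux s (cntFold s).items PySem.Set.empty List.nodup_nil).1

lemma mem_stepB (s : List (List Int)) (x : List Int) :
    x ∈ stepB s ↔ (nbrN s x = 3 ∨ (nbrN s x = 2 ∧ x ∈ s)) := by
  rw [stepB, (selfold_aux s (cntFold s).items PySem.Set.empty List.nodup_nil).2 x]
  rw [cntFold_eq, PySem.Dict.items_counter]
  simp only [PySem.Set.empty, List.not_mem_nil, false_or, List.mem_map]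
  constructor
  · rintro ⟨q, ⟨k, hk, rfl⟩, hc, rfl⟩
    dsimp only at hc
    rw [count_contribs] at hc
    rcases hc with hc | hc
    · exact Or.inl (by exact_mod_cast hc)
    · exact Or.inr ⟨by exact_mod_cast hc.1, hc.2⟩
  · intro hc
    have hcnt := count_contribs s x
    have hpos : 0 < (contribs s).count x := by
      rcases hc with h | h
      · omega
      · have := h.1; omega
    refine ⟨(x, ((contribs s).count x : Int)), ⟨x, ?_, rfl⟩, ?_, rfl⟩
    · exact (PySem.Set.mem_ofList _ _).mpr (List.count_pos_iff.mp hpos)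
    · dsimp only
      rcases hc with h | h
      · left; rw [hcnt]; exact_mod_cast h
      · right; exact ⟨by rw [hcnt]; exact_mod_cast h.1, h.2⟩

lemma nbrN_congr (sa sb : List (List Int)) (x : List Int) (hsa : sa.Nodup) (hsb : sb.Nodup)
    (h : ∀ y, y ∈ sa ↔ y ∈ sb) : nbrN sa x = nbrN sb x :=
  ((List.perm_ext_iff_of_nodup hsa hsb).mpr h).countP_eq _

lemma iterEq (l : List Int) :
    ∀ (d : PySem.Dict (List Int) String) (sa sb : List (List Int)),
      sa.Nodup → sb.Nodup → (∀ y, y ∈ sa ↔ y ∈ sb) →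
      (l.foldl (fun st (_ : Int) => stepA st.2) (d, sa)).2.Nodup ∧
      (l.foldl (fun s (_ : Int) => stepB s) sb).Nodup ∧
      (∀ y, y ∈ (l.foldl (fun st (_ : Int) => stepA st.2) (d, sa)).2 ↔
        y ∈ l.foldl (fun s (_ : Int) => stepB s) sb) := by
  induction l with
  | nil => intro d sa sb hsa hsb h; exact ⟨hsa, hsb, h⟩
  | cons i l ih =>
    intro d sa sb hsa hsb h
    simp only [List.foldl_cons]
    exact ih (stepA sa).1 (stepA sa).2 (stepB sb) (nodup_stepA sa) (nodup_stepB sb)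
      (fun y => by
        rw [mem_stepA sa hsa y, mem_stepB sb y,
          nbrN_congr sa sb y hsa hsb h, show (y ∈ sa) = (y ∈ sb) from propext (h y)])

-- ===== VERDICT (by name: the statement is the Claim_ definition above) =====
theorem part_one_py_spec : Claim_equal_part_one_py := by
  intro data _ hpre
  unfold Spec_part_one_py
  have hA : part_one_py data =
      PySem.List.len ((PySem.List.pyRange 0 6 1).foldl
        (fun st (_ : Int) => stepA st.2) (PySem.Dict.mk data.1, data.2)).2 := rfl
  have hB : part_one_py_alt data =
      PySem.List.len ((PySem.List.pyRange 0 6 1).foldl (fun s (_ : Int) => stepB s) data.2) := rfl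
  obtain ⟨hna, hnb, hm⟩ := iterEq (PySem.List.pyRange 0 6 1) (PySem.Dict.mk data.1)
    data.2 data.2 hpre hpre (fun _ => Iff.rfl)
  rw [hA, hB, PySem.List.len_eq, PySem.List.len_eq,
    ((List.perm_ext_iff_of_nodup hna hnb).mpr hm).length_eq]
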